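-- pv_equiv track=rewrite | github.com/hufolcher/advent | 2023/2/solution.py | power_from_sets
-- ===== SOURCE A (Python) =====
-- def power_from_sets(sets: list):
--     max_red = 1
--     max_green = 1
--     max_blue = 1
--     flattened = [item for sublist in sets for item in sublist]
--
--     for run in flattened:
--         if run[1] == "red":
--             max_red = max(max_red, int(run[0]))
--         elif run[1] == "green":
--             max_green = max(max_green, int(run[0]))
--         elif run[1] == "blue":
--             max_blue = max(max_blue, int(run[0]))
--     return(max_red*max_blue*max_green)
-- ===== SOURCE B (Python) =====
-- def power_from_sets(sets: list):
--     rgb = ("red", "green", "blue")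
--     # sort all red/green/blue runs by their count, largest first
--     runs = sorted((r for sub in sets for r in sub if r[1] in rgb),
--                   key=lambda r: int(r[0]), reverse=True)
--
--     def first(color):
--         # first entry of the descending list is that color's maximum count
--         return next((int(v) for v, c in runs if c == color), 1)
--
--     return max(1, first("red")) * max(1, first("green")) * max(1, first("blue"))
-- ===== Notes on version B (the rewrite author's own statement) =====
-- stated objective: alternative
-- what changed: Replaces A's single branchy three-accumulator running-max loop by a sort-then-scan: sort the red/green/blue runs descending by count once, then each color's maximum is its first occurrence in the sorted list (floored at 1, matching A's seed of 1).
import Mathlib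
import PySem

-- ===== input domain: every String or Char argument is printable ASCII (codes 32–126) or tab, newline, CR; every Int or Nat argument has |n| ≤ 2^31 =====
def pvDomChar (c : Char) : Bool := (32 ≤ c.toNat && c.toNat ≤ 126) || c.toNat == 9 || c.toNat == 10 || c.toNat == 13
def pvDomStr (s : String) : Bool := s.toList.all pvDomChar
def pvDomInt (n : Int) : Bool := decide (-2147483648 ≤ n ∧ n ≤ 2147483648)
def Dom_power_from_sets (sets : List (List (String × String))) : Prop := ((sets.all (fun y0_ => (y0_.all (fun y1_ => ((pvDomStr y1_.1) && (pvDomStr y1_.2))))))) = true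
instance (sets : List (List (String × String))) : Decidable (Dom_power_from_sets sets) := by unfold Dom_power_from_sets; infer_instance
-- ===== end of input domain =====

-- B replaces A's single three-accumulator running-max loop by sort-descending-by-count then first-match per color (return value only).

-- ===== PORT A =====
-- int(run[0]) is PySem.Int.ofStr?; the .getD 0 default is only reached outside Pre_ (where Python A raises ValueError)
def power_from_sets (sets : List (List (String × String))) : Int :=
  let flattened := sets.flatten
  let st := flattened.foldl (fun (st : Int × Int × Int) run =>
    if run.2 == "red" then (max st.1 ((PySem.Int.ofStr? run.1).getD 0), st.2.1, st.2.2)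
    else if run.2 == "green" then (st.1, max st.2.1 ((PySem.Int.ofStr? run.1).getD 0), st.2.2)
    else if run.2 == "blue" then (st.1, st.2.1, max st.2.2 ((PySem.Int.ofStr? run.1).getD 0))
    else st) (1, 1, 1)
  st.1 * st.2.2 * st.2.1

-- ===== PORT B =====
-- int(r[0]); the .getD 0 default is only reached outside Pre_ (where Python B raises ValueError in the sort key)
def pvVal (r : String × String) : Int := (PySem.Int.ofStr? r.1).getD 0

-- next((int(v) for v, c in runs if c == color), 1)
def pvFirst (runs : List (String × String)) (color : String) : Int :=
  match runs.find? (fun r => r.2 == color) with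
  | some r => pvVal r
  | none => 1

def power_from_sets_alt (sets : List (List (String × String))) : Int :=
  let runs := PySem.List.sorted
    (sets.flatten.filter (fun r => r.2 == "red" || r.2 == "green" || r.2 == "blue"))
    pvVal true
  max 1 (pvFirst runs "red") * max 1 (pvFirst runs "green") * max 1 (pvFirst runs "blue")

-- ===== PRECONDITION & SPEC =====
-- Pre_ excludes exactly the inputs where int() raises ValueError in both programs: a red/green/blue entry whose count string does not parse.
def Pre_power_from_sets (sets : List (List (String × String))) : Prop :=
  ∀ run ∈ sets.flatten, (run.2 = "red" ∨ run.2 = "green" ∨ run.2 = "blue") → (PySem.Int.ofStr? run.1).isSome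
instance (sets : List (List (String × String))) : Decidable (Pre_power_from_sets sets) := by unfold Pre_power_from_sets; infer_instance
def pvWitness_power_from_sets : (List (List (String × String))) := [[("3", "red"), ("7", "blue")], [("2", "green")]]
def Spec_power_from_sets (sets : List (List (String × String))) (out : Int) : Prop := out = power_from_sets_alt sets
instance (sets : List (List (String × String))) (out : Int) : Decidable (Spec_power_from_sets sets out) := by unfold Spec_power_from_sets; infer_instance

-- ===== CLAIM (what is proved, stated in full; the proofs are below) =====
def Claim_equal_power_from_sets : Prop := ∀ (sets : List (List (String × String))), Dom_power_from_sets sets → Pre_power_from_sets sets → Spec_power_from_sets sets (power_from_sets sets)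

-- ===== LEMMAS AND PROOFS =====

-- A's one loop splits into three independent running maxima over the per-color sublists
theorem pv_fold_split (l : List (String × String)) (r g b : Int) :
    l.foldl (fun (st : Int × Int × Int) run =>
      if run.2 == "red" then (max st.1 (pvVal run), st.2.1, st.2.2)
      else if run.2 == "green" then (st.1, max st.2.1 (pvVal run), st.2.2)
      else if run.2 == "blue" then (st.1, st.2.1, max st.2.2 (pvVal run))
      else st) (r, g, b)
    = ((l.filter (fun x => x.2 == "red")).foldl (fun m x => max m (pvVal x)) r,
       (l.filter (fun x => x.2 == "green")).foldl (fun m x => max m (pvVal x)) g,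
       (l.filter (fun x => x.2 == "blue")).foldl (fun m x => max m (pvVal x)) b) := by
  induction l generalizing r g b with
  | nil => rfl
  | cons x xs ih =>
    by_cases hr : x.2 = "red"
    · simp only [List.foldl_cons, List.filter_cons, hr]
      exact ih _ _ _
    · by_cases hg : x.2 = "green"
      · simp only [List.foldl_cons, List.filter_cons, hg]
        exact ih _ _ _
      · by_cases hb : x.2 = "blue"
        · simp only [List.foldl_cons, List.filter_cons, hb]
          exact ih _ _ _
        · have hstep : ∀ c : String, (x.2 == c) = decide (x.2 = c) := fun c => by
            by_cases h : x.2 = c <;> simp [h]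
          simp only [List.foldl_cons, List.filter_cons, hstep, hr, hg, hb]
          exact ih _ _ _

-- a running max stays at its seed when the seed dominates the list
theorem pv_foldl_max_const (l : List (String × String)) (a : Int)
    (h : ∀ y ∈ l, pvVal y ≤ a) :
    l.foldl (fun m x => max m (pvVal x)) a = a := by
  induction l with
  | nil => rfl
  | cons x xs ih =>
    have hx : pvVal x ≤ a := h x (by simp)
    simp only [List.foldl_cons, max_eq_left hx]
    exact ih (fun y hy => h y (by simp [hy]))

-- on a descending list, first match floored at 1 = running max over the matches seeded with 1
theorem pv_first_eq_fold (runs : List (String × String)) (c : String)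
    (hp : runs.Pairwise (fun a b => pvVal b ≤ pvVal a)) :
    max 1 (pvFirst runs c)
      = (runs.filter (fun x => x.2 == c)).foldl (fun m x => max m (pvVal x)) 1 := by
  induction runs with
  | nil => simp [pvFirst]
  | cons x xs ih =>
    rcases List.pairwise_cons.mp hp with ⟨hdom, htail⟩
    by_cases hc : x.2 = c
    · have hfind : (x :: xs).find? (fun r => r.2 == c) = some x := by
        simp [hc]
      have : (xs.filter (fun r => r.2 == c)).foldl (fun m x => max m (pvVal x))
          (max 1 (pvVal x)) = max 1 (pvVal x) := by
        apply pv_foldl_max_const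
        intro y hy
        exact le_trans (hdom y (List.mem_of_mem_filter hy)) (le_max_right _ _)
      simp [pvFirst, hfind, hc, this]
    · have hfind : (x :: xs).find? (fun r => r.2 == c) = xs.find? (fun r => r.2 == c) := by
        simp [hc]
      have hfil : (x :: xs).filter (fun r => r.2 == c) = xs.filter (fun r => r.2 == c) := by
        simp [hc]
      rw [hfil, ← ih htail]
      simp [pvFirst, hfind]

-- fold of a running max is permutation-invariant
theorem pv_foldl_perm {l1 l2 : List (String × String)}
    (hp : l1.Perm l2) (a : Int) :
    l1.foldl (fun m x => max m (pvVal x)) a = l2.foldl (fun m x => max m (pvVal x)) a :=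
  hp.foldl_eq' (fun x _ y _ z => by
    simp only [max_assoc, max_comm (pvVal x) (pvVal y)]) a

-- filtering by one color commutes with the rgb pre-filter
theorem pv_filter_filter (l : List (String × String)) (c : String)
    (hc : c = "red" ∨ c = "green" ∨ c = "blue") :
    (l.filter (fun r => r.2 == "red" || r.2 == "green" || r.2 == "blue")).filter
        (fun x => x.2 == c)
      = l.filter (fun x => x.2 == c) := by
  rw [List.filter_filter]
  apply List.filter_congr
  intro x _
  by_cases h : x.2 = c
  · rcases hc with h1 | h1 | h1 <;> simp [h, h1]
  · simp [h]

-- B's per-color first-match equals A's per-color running max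
theorem pv_color_eq (sets : List (List (String × String))) (c : String)
    (hc : c = "red" ∨ c = "green" ∨ c = "blue") :
    max 1 (pvFirst (PySem.List.sorted
        (sets.flatten.filter (fun r => r.2 == "red" || r.2 == "green" || r.2 == "blue"))
        pvVal true) c)
      = (sets.flatten.filter (fun x => x.2 == c)).foldl (fun m x => max m (pvVal x)) 1 := by
  rw [pv_first_eq_fold _ _ (PySem.List.sorted_pairwise_rev _ _)]
  rw [pv_foldl_perm (List.Perm.filter _ (PySem.List.sorted_perm _ _ _))]
  rw [pv_filter_filter _ _ hc]

-- ===== VERDICT (by name: the statement is the Claim_ definition above) =====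
theorem power_from_sets_spec : Claim_equal_power_from_sets := by
  intro sets _ _
  unfold Spec_power_from_sets power_from_sets power_from_sets_alt
  dsimp only
  have h := pv_fold_split sets.flatten 1 1 1
  simp only [pvVal] at h
  rw [h]
  have hr := pv_color_eq sets "red" (by simp)
  have hg := pv_color_eq sets "green" (by simp)
  have hb := pv_color_eq sets "blue" (by simp)
  simp only [pvVal] at hr hg hb
  rw [← hr, ← hg, ← hb]
  ring
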